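-- pv_equiv track=rewrite | github.com/mjohnson11/VLTE_PIPELINES | WGS/.ipynb_checkpoints/process_files_and_run_go-checkpoint.py | get_mutation_type
-- ===== SOURCE A (Python) =====
-- def get_mutation_type(ann):
--     if len(str(ann).split('|'))>1:
--         if str(ann).split('|')[1]=='SV':
--             return 'SV'
--         splitter = str(ann).split(',')
--         for mt in mutation_types_in_consequence_order:
--             for s in splitter:
--                 if len(s.split('|'))>1:
--                     if s.split('|')[1] == mt:
--                         return mt
--     # if none of the listed types, call it noncoding
--     return 'noncoding'
--
-- mutation_types_in_consequence_order = ['indel', 'nonsense', 'missense', 'synonymous', 'noncoding']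
-- ===== SOURCE B (Python) =====
-- mutation_types_in_consequence_order = ['indel', 'nonsense', 'missense', 'synonymous', 'noncoding']
--
-- _RANK = {mt: i for i, mt in enumerate(mutation_types_in_consequence_order)}
--
-- def get_mutation_type(ann):
--     a = str(ann)
--     head = a.split('|')
--     if len(head) <= 1:
--         return 'noncoding'
--     if head[1] == 'SV':
--         return 'SV'
--     # one pass: minimal priority rank over all comma segments (5 = no listed type)
--     best = 5
--     for s in a.split(','):
--         f = s.split('|')
--         if len(f) > 1:
--             best = min(best, _RANK.get(f[1], 5))
--     return mutation_types_in_consequence_order[best] if best < 5 else 'noncoding'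
-- ===== Notes on version B (the rewrite author's own statement) =====
-- stated objective: simpler
-- what changed: Replaces A's priority-ordered nested scan (types x segments with early return) by a single numeric pass: one fold over the comma segments taking the minimum priority rank via a rank dict, then one list index mapping the minimal rank back to its type.
import Mathlib
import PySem

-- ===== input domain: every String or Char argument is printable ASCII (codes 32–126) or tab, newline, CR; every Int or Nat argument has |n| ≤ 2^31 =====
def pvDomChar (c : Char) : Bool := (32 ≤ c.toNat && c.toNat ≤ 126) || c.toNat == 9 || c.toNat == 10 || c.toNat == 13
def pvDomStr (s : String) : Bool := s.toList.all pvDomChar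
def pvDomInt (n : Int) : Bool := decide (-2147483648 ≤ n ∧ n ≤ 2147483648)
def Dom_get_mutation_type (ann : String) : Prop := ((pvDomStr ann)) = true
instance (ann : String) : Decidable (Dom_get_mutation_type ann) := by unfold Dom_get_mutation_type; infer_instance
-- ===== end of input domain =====

-- B replaces A's priority-ordered nested scan (types × segments with early return) by a single
-- numeric pass: one fold over the comma segments taking the MINIMUM priority rank (via a rank
-- dict), then one list index mapping the minimal rank back to its type (objective: simpler).

def mutation_types_in_consequence_order : List String :=
  ["indel", "nonsense", "missense", "synonymous", "noncoding"]

-- ===== PORT A =====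
-- s.split(sep) for the constant non-empty separators "|" and "," (split? is none only for sep = "")
def pvSplit (s sep : String) : List String := (PySem.Str.split? s sep).getD []

-- inner 'for s in splitter' loop: returns true when some segment's field [1] equals mt
def pvInnerA (mt : String) : List String → Bool
  | [] => false
  | s :: rest =>
    if (pvSplit s "|").length > 1 then
      if (pvSplit s "|").getD 1 "" == mt then true else pvInnerA mt rest
    else pvInnerA mt rest

-- outer 'for mt in mutation_types_in_consequence_order' loop with early return
def pvOuterA (splitter : List String) : List String → String
  | [] => "noncoding"
  | mt :: rest => if pvInnerA mt splitter then mt else pvOuterA splitter rest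

def get_mutation_type (ann : String) : String :=
  if (pvSplit ann "|").length > 1 then
    if (pvSplit ann "|").getD 1 "" == "SV" then "SV"
    else pvOuterA (pvSplit ann ",") mutation_types_in_consequence_order
  else "noncoding"

-- ===== PORT B =====
-- _RANK = {mt: i for i, mt in enumerate(mutation_types_in_consequence_order)}
def pvRankD : PySem.Dict String Int :=
  (PySem.List.enumerate mutation_types_in_consequence_order 0).foldl
    (fun d p => d.insert p.2 p.1) PySem.Dict.empty

-- _RANK.get(x, 5)
def pvRank (x : String) : Int := PySem.Dict.getD pvRankD x 5

-- the 'for s in a.split(',')' accumulator loop: best = min(best, _RANK.get(f[1], 5))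
def pvBest (segs : List String) : Int :=
  segs.foldl
    (fun b s =>
      let f := pvSplit s "|"
      if f.length > 1 then min b (pvRank (f.getD 1 "")) else b) 5

def get_mutation_type_alt (ann : String) : String :=
  let head := pvSplit ann "|"
  if head.length ≤ 1 then "noncoding"
  else if head.getD 1 "" == "SV" then "SV"
  else
    let best := pvBest (pvSplit ann ",")
    if best < 5 then
      (PySem.List.pyGet? mutation_types_in_consequence_order best).getD "noncoding"
    else "noncoding"

-- ===== PRECONDITION & SPEC =====
def Spec_get_mutation_type (ann : String) (out : String) : Prop := out = get_mutation_type_alt ann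
instance (ann : String) (out : String) : Decidable (Spec_get_mutation_type ann out) := by unfold Spec_get_mutation_type; infer_instance

-- ===== CLAIM =====
def Claim_equal_get_mutation_type : Prop := ∀ (ann : String), Dom_get_mutation_type ann → Spec_get_mutation_type ann (get_mutation_type ann)

-- ===== LEMMAS AND PROOFS =====
theorem pvRank_spec (x : String) :
    pvRank x = if x = "indel" then 0 else if x = "nonsense" then 1 else if x = "missense" then 2
      else if x = "synonymous" then 3 else if x = "noncoding" then 4 else 5 := by
  have h : pvRankD = PySem.Dict.mk
      [("indel", 0), ("nonsense", 1), ("missense", 2), ("synonymous", 3), ("noncoding", 4)] := by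
    decide
  by_cases e0 : x = "indel"
  · subst e0; decide
  by_cases e1 : x = "nonsense"
  · subst e1; decide
  by_cases e2 : x = "missense"
  · subst e2; decide
  by_cases e3 : x = "synonymous"
  · subst e3; decide
  by_cases e4 : x = "noncoding"
  · subst e4; decide
  have c0 : ("indel" == x) = false := beq_eq_false_iff_ne.mpr (Ne.symm e0)
  have c1 : ("nonsense" == x) = false := beq_eq_false_iff_ne.mpr (Ne.symm e1)
  have c2 : ("missense" == x) = false := beq_eq_false_iff_ne.mpr (Ne.symm e2)
  have c3 : ("synonymous" == x) = false := beq_eq_false_iff_ne.mpr (Ne.symm e3)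
  have c4 : ("noncoding" == x) = false := beq_eq_false_iff_ne.mpr (Ne.symm e4)
  rw [if_neg e0, if_neg e1, if_neg e2, if_neg e3, if_neg e4, pvRank, h,
    PySem.Dict.getD_eq_get?_getD]
  simp only [PySem.Dict.get?_mk_cons, c0, c1, c2, c3, c4, if_false, Bool.false_eq_true]
  rfl

theorem pvInnerA_iff (mt : String) (segs : List String) :
    pvInnerA mt segs = true ↔
      ∃ s ∈ segs, (pvSplit s "|").length > 1 ∧ (pvSplit s "|").getD 1 "" = mt := by
  induction segs with
  | nil => simp [pvInnerA]
  | cons s rest ih =>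
    by_cases hl : (pvSplit s "|").length > 1
    · by_cases he : (pvSplit s "|").getD 1 "" = mt
      · have hL : pvInnerA mt (s :: rest) = true := by
          simp only [pvInnerA]
          rw [if_pos hl, if_pos (by simpa using he)]
        rw [hL]
        exact iff_of_true rfl ⟨s, List.mem_cons_self, hl, he⟩
      · have hstep : pvInnerA mt (s :: rest) = pvInnerA mt rest := by
          simp only [pvInnerA]
          rw [if_pos hl, if_neg (by simpa using he)]
        rw [hstep, ih]
        constructor
        · rintro ⟨t, ht, h⟩; exact ⟨t, List.mem_cons_of_mem _ ht, h⟩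
        · rintro ⟨t, ht, h⟩
          rcases List.mem_cons.mp ht with rfl | ht'
          · exact absurd h.2 he
          · exact ⟨t, ht', h⟩
    · have hstep : pvInnerA mt (s :: rest) = pvInnerA mt rest := by
        simp only [pvInnerA]; rw [if_neg hl]
      rw [hstep, ih]
      constructor
      · rintro ⟨t, ht, h⟩; exact ⟨t, List.mem_cons_of_mem _ ht, h⟩
      · rintro ⟨t, ht, h⟩
        rcases List.mem_cons.mp ht with rfl | ht'
        · exact absurd h.1 hl
        · exact ⟨t, ht', h⟩

-- characterisation of the min-fold
theorem pvBestAux_le_iff (segs : List String) (b i : Int) :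
    segs.foldl
      (fun b s =>
        let f := pvSplit s "|"
        if f.length > 1 then min b (pvRank (f.getD 1 "")) else b) b ≤ i ↔
      b ≤ i ∨ ∃ s ∈ segs, (pvSplit s "|").length > 1 ∧ pvRank ((pvSplit s "|").getD 1 "") ≤ i := by
  induction segs generalizing b with
  | nil => simp
  | cons s rest ih =>
    simp only [List.foldl_cons]
    by_cases hl : (pvSplit s "|").length > 1
    · rw [if_pos hl, ih]
      constructor
      · rintro (h | ⟨t, ht, h⟩)
        · rcases min_le_iff.mp h with h' | h'
          · exact Or.inl h'
          · exact Or.inr ⟨s, List.mem_cons_self, hl, h'⟩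
        · exact Or.inr ⟨t, List.mem_cons_of_mem _ ht, h⟩
      · rintro (h | ⟨t, ht, h⟩)
        · exact Or.inl (le_trans (min_le_left _ _) h)
        · rcases List.mem_cons.mp ht with rfl | ht'
          · exact Or.inl (le_trans (min_le_right _ _) h.2)
          · exact Or.inr ⟨t, ht', h⟩
    · rw [if_neg hl, ih]
      constructor
      · rintro (h | ⟨t, ht, h⟩)
        · exact Or.inl h
        · exact Or.inr ⟨t, List.mem_cons_of_mem _ ht, h⟩
      · rintro (h | ⟨t, ht, h⟩)
        · exact Or.inl h
        · rcases List.mem_cons.mp ht with rfl | ht'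
          · exact absurd h.1 hl
          · exact Or.inr ⟨t, ht', h⟩

theorem pvBest_le_iff (segs : List String) (i : Int) :
    pvBest segs ≤ i ↔
      5 ≤ i ∨ ∃ s ∈ segs, (pvSplit s "|").length > 1 ∧ pvRank ((pvSplit s "|").getD 1 "") ≤ i :=
  pvBestAux_le_iff segs 5 i

theorem pvBest_le_five (segs : List String) : pvBest segs ≤ 5 :=
  (pvBest_le_iff segs 5).mpr (Or.inl le_rfl)

-- if best ≤ i < 5 then some type of index ≤ i occurs as a field
theorem exists_inner_of_pvBest_le (segs : List String) (i : Int) (hi : i < 5)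
    (h : pvBest segs ≤ i) :
    (0 ≤ i ∧ pvInnerA "indel" segs = true) ∨ (1 ≤ i ∧ pvInnerA "nonsense" segs = true) ∨
    (2 ≤ i ∧ pvInnerA "missense" segs = true) ∨ (3 ≤ i ∧ pvInnerA "synonymous" segs = true) ∨
    (4 ≤ i ∧ pvInnerA "noncoding" segs = true) := by
  rcases (pvBest_le_iff segs i).mp h with h5 | ⟨s, hs, hl, hr⟩
  · omega
  · rw [pvRank_spec] at hr
    split_ifs at hr with e0 e1 e2 e3 e4
    · exact Or.inl ⟨hr, (pvInnerA_iff _ _).mpr ⟨s, hs, hl, e0⟩⟩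
    · exact Or.inr (Or.inl ⟨hr, (pvInnerA_iff _ _).mpr ⟨s, hs, hl, e1⟩⟩)
    · exact Or.inr (Or.inr (Or.inl ⟨hr, (pvInnerA_iff _ _).mpr ⟨s, hs, hl, e2⟩⟩))
    · exact Or.inr (Or.inr (Or.inr (Or.inl ⟨hr, (pvInnerA_iff _ _).mpr ⟨s, hs, hl, e3⟩⟩)))
    · exact Or.inr (Or.inr (Or.inr (Or.inr ⟨hr, (pvInnerA_iff _ _).mpr ⟨s, hs, hl, e4⟩⟩)))
    · omega

theorem pvBest_le_of_inner (segs : List String) (mt : String) (i : Int)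
    (hr : pvRank mt = i) (h : pvInnerA mt segs = true) : pvBest segs ≤ i := by
  rcases (pvInnerA_iff mt segs).mp h with ⟨s, hs, hl, he⟩
  exact (pvBest_le_iff segs i).mpr (Or.inr ⟨s, hs, hl, by rw [he, hr]⟩)

theorem outer_eq_best (segs : List String) :
    pvOuterA segs mutation_types_in_consequence_order =
      (if pvBest segs < 5 then
        (PySem.List.pyGet? mutation_types_in_consequence_order (pvBest segs)).getD "noncoding"
      else "noncoding") := by
  by_cases h0 : pvInnerA "indel" segs = true
  · have hb : pvBest segs = 0 := by
      have h1 := pvBest_le_of_inner segs "indel" 0 (by decide) h0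
      have h2 : ¬ pvBest segs ≤ -1 := fun hc => by
        rcases exists_inner_of_pvBest_le segs (-1) (by norm_num) hc with h | h | h | h | h <;> omega
      omega
    simp [mutation_types_in_consequence_order, pvOuterA, h0, hb]
  · by_cases h1 : pvInnerA "nonsense" segs = true
    · have hb : pvBest segs = 1 := by
        have ha := pvBest_le_of_inner segs "nonsense" 1 (by decide) h1
        have h2 : ¬ pvBest segs ≤ 0 := fun hc => by
          rcases exists_inner_of_pvBest_le segs 0 (by norm_num) hc with h | h | h | h | h <;>
            first | exact h0 h.2 | omega
        omega
      simp [mutation_types_in_consequence_order, pvOuterA, h0, h1, hb]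
    · by_cases h2 : pvInnerA "missense" segs = true
      · have hb : pvBest segs = 2 := by
          have ha := pvBest_le_of_inner segs "missense" 2 (by decide) h2
          have hn : ¬ pvBest segs ≤ 1 := fun hc => by
            rcases exists_inner_of_pvBest_le segs 1 (by norm_num) hc with h | h | h | h | h <;>
              first | exact h0 h.2 | exact h1 h.2 | omega
          omega
        simp [mutation_types_in_consequence_order, pvOuterA, h0, h1, h2, hb]
      · by_cases h3 : pvInnerA "synonymous" segs = true
        · have hb : pvBest segs = 3 := by
            have ha := pvBest_le_of_inner segs "synonymous" 3 (by decide) h3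
            have hn : ¬ pvBest segs ≤ 2 := fun hc => by
              rcases exists_inner_of_pvBest_le segs 2 (by norm_num) hc with h | h | h | h | h <;>
                first | exact h0 h.2 | exact h1 h.2 | exact h2 h.2 | omega
            omega
          simp [mutation_types_in_consequence_order, pvOuterA, h0, h1, h2, h3, hb]
        · by_cases h4 : pvInnerA "noncoding" segs = true
          · have hb : pvBest segs = 4 := by
              have ha := pvBest_le_of_inner segs "noncoding" 4 (by decide) h4
              have hn : ¬ pvBest segs ≤ 3 := fun hc => by
                rcases exists_inner_of_pvBest_le segs 3 (by norm_num) hc with h | h | h | h | h <;>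
                  first | exact h0 h.2 | exact h1 h.2 | exact h2 h.2 | exact h3 h.2 | omega
              omega
            simp [mutation_types_in_consequence_order, pvOuterA, h0, h1, h2, h3, h4, hb]
          · have hb : pvBest segs = 5 := by
              have ha := pvBest_le_five segs
              have hn : ¬ pvBest segs ≤ 4 := fun hc => by
                rcases exists_inner_of_pvBest_le segs 4 (by norm_num) hc with h | h | h | h | h <;>
                  first | exact h0 h.2 | exact h1 h.2 | exact h2 h.2 | exact h3 h.2 | exact h4 h.2
              omega
            simp [mutation_types_in_consequence_order, pvOuterA, h0, h1, h2, h3, h4, hb]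

-- ===== VERDICT =====
theorem get_mutation_type_spec : Claim_equal_get_mutation_type := by
  intro ann _
  show get_mutation_type ann = get_mutation_type_alt ann
  unfold get_mutation_type get_mutation_type_alt
  rw [outer_eq_best]
  by_cases hl : (pvSplit ann "|").length > 1
  · rw [if_pos hl, if_neg (show ¬ (pvSplit ann "|").length ≤ 1 by omega)]
  · rw [if_neg hl, if_pos (show (pvSplit ann "|").length ≤ 1 by omega)]
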